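-- pv_equiv track=rewrite | github.com/jeremyrrose/team-binary-algo-practice | index.py | five_inserter
-- ===== SOURCE A (Python) =====
-- def five_inserter (original):
--
--     # split the number into ordered array of digits
--     digits = [int(n) for n in str(original)]
--
--     # find the earliest index 5 or lower, else -1
--     try:
--         insert_here = list(map(lambda n: n <= 5, digits)).index(True)
--     except:
--         insert_here = len(digits)
--
--     # insert 5 at specified index
--     digits = digits[:insert_here] + [5] + digits[insert_here:]
--
--     # return an integer derived from the joined digits
--     return int(''.join(str(n) for n in digits))
-- ===== SOURCE B (Python) =====
-- def five_inserter(original):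
--     # Build the answer back-to-front: walk str(original) from the RIGHT, maintaining
--     # two candidate suffixes of the result:
--     #   plain -- the suffix of digits seen so far, unchanged
--     #   best  -- that suffix with '5' inserted before ITS leftmost digit <= 5 (None if it has none)
--     # Each step either starts a new insertion (current digit <= 5, which is now the
--     # leftmost known) or extends both candidates. At the end, best is the answer if an
--     # insertion point exists, else the '5' goes after all digits.
--     plain = ''
--     best = None
--     for c in reversed(str(original)):
--         best = '5' + c + plain if int(c) <= 5 else (None if best is None else c + best)
--         plain = c + plain
--     return int(plain + '5' if best is None else best)
-- ===== Notes on version B (the rewrite author's own statement) =====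
-- stated objective: alternative
-- what changed: B builds the result back-to-front: a single reverse traversal of str(original) maintains two candidate suffixes (the digits unchanged, and the same suffix with '5' already inserted before its leftmost digit <= 5), picking the inserted candidate at the end or appending '5'; A instead maps to a digit list, searches for the insertion index via map+index with try/except, and reassembles by slicing.
import Mathlib
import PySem

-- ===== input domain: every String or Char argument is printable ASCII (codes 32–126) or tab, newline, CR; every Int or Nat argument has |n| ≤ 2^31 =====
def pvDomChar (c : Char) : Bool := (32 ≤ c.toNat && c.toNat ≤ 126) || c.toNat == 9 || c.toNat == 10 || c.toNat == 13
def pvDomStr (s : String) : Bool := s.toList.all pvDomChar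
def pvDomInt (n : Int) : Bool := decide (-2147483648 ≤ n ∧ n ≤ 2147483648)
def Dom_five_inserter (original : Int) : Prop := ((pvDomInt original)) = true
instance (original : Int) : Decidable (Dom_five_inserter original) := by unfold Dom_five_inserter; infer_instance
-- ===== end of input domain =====

-- B builds the result back-to-front with two candidate suffixes instead of A's index search + slices; similar cost.

-- ===== PORT A =====
-- shared helper: int(c) for a one-character string; under Pre_ every char of
-- str(original) is a decimal digit, so the parse succeeds (the getD 0 is unreachable there)
def pvIntOfChar (c : Char) : Int := (PySem.Int.ofChars? [c]).getD 0

def five_inserter (original : Int) : Int :=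
  -- digits = [int(n) for n in str(original)]
  let digits := (PySem.Int.toChars original).map pvIntOfChar
  -- insert_here = list(map(lambda n: n <= 5, digits)).index(True); except -> len(digits)
  let insert_here : Int :=
    match PySem.List.index? (digits.map (fun n => decide (n ≤ 5))) true with
    | some i => (i : Int)
    | none => PySem.List.len digits
  -- digits = digits[:insert_here] + [5] + digits[insert_here:]
  let digits2 := PySem.List.slice digits none (some insert_here) ++ [5] ++
                 PySem.List.slice digits (some insert_here) none
  -- int(''.join(str(n) for n in digits))  (the join is always a nonempty digit string)
  (PySem.Int.ofChars? ((digits2.map PySem.Int.toChars).flatten)).getD 0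

-- ===== PORT B =====
-- loop body over one char c of the REVERSED string; state = (plain, best):
--   best = '5' + c + plain if int(c) <= 5 else (None if best is None else c + best); plain = c + plain
def pvAltStep (st : List Char × Option (List Char)) (c : Char) : List Char × Option (List Char) :=
  (c :: st.1,
   if pvIntOfChar c ≤ 5 then some ('5' :: c :: st.1) else st.2.map (fun b => c :: b))

def five_inserter_alt (original : Int) : Int :=
  -- for c in reversed(str(original)): …
  let p := (PySem.Int.toChars original).reverse.foldl pvAltStep ([], none)
  -- int(plain + '5' if best is None else best)
  let out := match p.2 with
             | none => p.1 ++ ['5']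
             | some b => b
  (PySem.Int.ofChars? out).getD 0

-- ===== PRECONDITION & SPEC =====
-- Pre_ excludes negative originals: there str(original) starts with '-' and int('-') raises ValueError in both A and B.
def Pre_five_inserter (original : Int) : Prop := 0 ≤ original
instance (original : Int) : Decidable (Pre_five_inserter original) := by unfold Pre_five_inserter; infer_instance
def pvWitness_five_inserter : Int := (42)

def Spec_five_inserter (original : Int) (out : Int) : Prop := out = five_inserter_alt original
instance (original : Int) (out : Int) : Decidable (Spec_five_inserter original out) := by unfold Spec_five_inserter; infer_instance

-- ===== CLAIM (what is proved, stated in full; the proofs are below) =====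
def Claim_equal_five_inserter : Prop := ∀ (original : Int), Dom_five_inserter original → Pre_five_inserter original → Spec_five_inserter original (five_inserter original)

-- ===== LEMMAS AND PROOFS =====

-- the decimal digit characters
def pvDigs : List Char := ['0','1','2','3','4','5','6','7','8','9']

-- common specification of both middles: insert '5' before the first digit ≤ 5, else at the end
def pvIns : List Char → List Char
  | [] => ['5']
  | c :: r => if pvIntOfChar c ≤ 5 then '5' :: c :: r else c :: pvIns r

-- A's middle pipeline as a function of the character list
def pvMid (cs : List Char) : List Char :=
  let digits := cs.map pvIntOfChar
  let insert_here : Int :=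
    match PySem.List.index? (digits.map (fun n => decide (n ≤ 5))) true with
    | some i => (i : Int)
    | none => PySem.List.len digits
  ((PySem.List.slice digits none (some insert_here) ++ [5] ++
    PySem.List.slice digits (some insert_here) none).map PySem.Int.toChars).flatten

lemma pvA_eq (original : Int) :
    five_inserter original
      = (PySem.Int.ofChars? (pvMid (PySem.Int.toChars original))).getD 0 := rfl

lemma pvToDigitsCore_digs : ∀ (fuel n : Nat) (acc : List Char),
    (∀ c ∈ acc, c ∈ pvDigs) → ∀ c ∈ Nat.toDigitsCore 10 fuel n acc, c ∈ pvDigs := by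
  intro fuel
  induction fuel with
  | zero => intro n acc hacc; rw [Nat.toDigitsCore]; exact hacc
  | succ fuel ih =>
      intro n acc hacc c hc
      rw [Nat.toDigitsCore] at hc
      have hall : ∀ k < 10, Nat.digitChar k ∈ pvDigs := by decide
      have hd : Nat.digitChar (n % 10) ∈ pvDigs := hall _ (Nat.mod_lt _ (by omega))
      have hacc' : ∀ x ∈ (n % 10).digitChar :: acc, x ∈ pvDigs := by
        intro x hx
        rcases List.mem_cons.mp hx with h | h
        · exact h ▸ hd
        · exact hacc _ h
      by_cases hz : n / 10 = 0
      · simp only [hz] at hc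
        exact hacc' c hc
      · simp only [if_neg hz] at hc
        exact ih _ _ hacc' c hc

lemma pvToChars_digs (n : Int) (hn : 0 ≤ n) : ∀ c ∈ PySem.Int.toChars n, c ∈ pvDigs := by
  unfold PySem.Int.toChars
  rw [if_neg (by omega)]
  exact pvToDigitsCore_digs _ _ [] (by simp)

lemma pvRound : ∀ c ∈ pvDigs, PySem.Int.toChars (pvIntOfChar c) = [c] := by
  intro c hc; fin_cases hc <;> rfl

lemma pvJoin (cs : List Char) (h : ∀ c ∈ cs, c ∈ pvDigs) :
    ((cs.map pvIntOfChar).map PySem.Int.toChars).flatten = cs := by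
  induction cs with
  | nil => rfl
  | cons c r ih =>
      simp only [List.map_cons, List.flatten_cons]
      rw [pvRound c (h c (by simp)), ih (fun x hx => h x (by simp [hx]))]
      rfl

lemma pvMid_cons_gt (c : Char) (r : List Char) (h5 : ¬ pvIntOfChar c ≤ 5) :
    pvMid (c :: r) = PySem.Int.toChars (pvIntOfChar c) ++ pvMid r := by
  unfold pvMid
  simp only [List.map_cons, decide_eq_false h5]
  rw [PySem.List.index?_cons_of_ne _ Bool.false_ne_true]
  cases hidx : PySem.List.index? ((r.map pvIntOfChar).map (fun n => decide (n ≤ 5))) true with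
  | some j =>
      simp only [Option.map_some]
      rw [PySem.List.slice_to_natCast, PySem.List.slice_from_natCast,
          PySem.List.slice_to_natCast, PySem.List.slice_from_natCast]
      simp [List.take_succ_cons, List.drop_succ_cons]
  | none =>
      simp only [Option.map_none, PySem.List.len_eq, List.length_cons, List.length_map]
      rw [PySem.List.slice_to_natCast, PySem.List.slice_from_natCast,
          PySem.List.slice_to_natCast, PySem.List.slice_from_natCast]
      simp [List.take_succ_cons, List.drop_succ_cons]

lemma pvMid_eq (cs : List Char) (h : ∀ c ∈ cs, c ∈ pvDigs) : pvMid cs = pvIns cs := by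
  induction cs with
  | nil => decide
  | cons c r ih =>
      have hc : c ∈ pvDigs := h c (by simp)
      have hr : ∀ x ∈ r, x ∈ pvDigs := fun x hx => h x (by simp [hx])
      by_cases h5 : pvIntOfChar c ≤ 5
      · unfold pvMid
        simp only [List.map_cons, decide_eq_true h5, PySem.List.index?_cons_self]
        rw [PySem.List.slice_to_natCast, PySem.List.slice_from_natCast]
        simp only [List.take_zero, List.drop_zero]
        rw [show ([] ++ [5] ++ pvIntOfChar c :: List.map pvIntOfChar r)
              = (5 :: List.map pvIntOfChar (c :: r)) by simp]
        simp only [List.map_cons, List.flatten_cons]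
        rw [show PySem.Int.toChars 5 = ['5'] from rfl, pvRound c hc, pvJoin r hr]
        simp [pvIns, if_pos h5]
      · rw [pvMid_cons_gt c r h5, pvRound c hc, ih hr]
        simp [pvIns, if_neg h5]

-- invariant of B's reverse fold, phrased as a foldr: plain is the suffix itself, and
-- best is its pvIns-image exactly when it contains a digit ≤ 5
lemma pvB_inv (cs : List Char) :
    cs.foldr (fun c st => pvAltStep st c) ([], none)
      = (cs, if cs.any (fun c => decide (pvIntOfChar c ≤ 5)) then some (pvIns cs) else none) := by
  induction cs with
  | nil => rfl
  | cons c r ih =>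
      simp only [List.foldr_cons]
      rw [ih]
      simp only [pvAltStep, List.any_cons]
      by_cases h5 : pvIntOfChar c ≤ 5
      · simp [h5, pvIns]
      · by_cases hr : r.any (fun c => decide (pvIntOfChar c ≤ 5))
        · simp [h5, hr, pvIns]
        · simp [h5, hr]

-- when no digit ≤ 5 occurs, the insertion lands at the very end
lemma pvIns_no5 (cs : List Char) (h : cs.any (fun c => decide (pvIntOfChar c ≤ 5)) = false) :
    pvIns cs = cs ++ ['5'] := by
  induction cs with
  | nil => rfl
  | cons c r ih =>
      simp only [List.any_cons, Bool.or_eq_false_iff, decide_eq_false_iff_not] at h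
      simp [pvIns, h.1, ih h.2]

lemma pvB_eq (original : Int) :
    five_inserter_alt original
      = (PySem.Int.ofChars? (pvIns (PySem.Int.toChars original))).getD 0 := by
  unfold five_inserter_alt
  rw [List.foldl_reverse, pvB_inv]
  by_cases h : (PySem.Int.toChars original).any (fun c => decide (pvIntOfChar c ≤ 5))
  · simp [h]
  · simp only [Bool.not_eq_true] at h
    simp [h, pvIns_no5 _ h]

-- ===== VERDICT (by name: the statement is the Claim_ definition above) =====
theorem five_inserter_spec : Claim_equal_five_inserter := by
  intro original _ hpre
  unfold Spec_five_inserter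
  rw [pvA_eq, pvB_eq, pvMid_eq _ (pvToChars_digs original hpre)]
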